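-- pv_equiv track=rewrite | github.com/gsyan/thefirst_server | tools/generator/generate_network_dtos.py | map_csharp_type_to_java
-- ===== SOURCE A (Python) =====
-- def map_csharp_type_to_java(csharp_type):
--     """C# 타입을 Java 타입으로 매핑"""
--     type_mapping = {
--         'int': 'Integer',
--         'long': 'Long',
--         'float': 'Float',
--         'double': 'Double',
--         'bool': 'Boolean',
--         'string': 'String',
--         'short': 'Short',
--         'byte': 'Byte',
--     }
--
--     # nullable 타입 처리 (long? -> Long) - ? 제거
--     if csharp_type.endswith('?'):
--         csharp_type = csharp_type[:-1]
--
--     # 배열 타입 처리 (ShipInfo[] -> List<ShipInfo>)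
--     if csharp_type.endswith('[]'):
--         element_type = csharp_type[:-2]
--         java_element_type = map_csharp_type_to_java(element_type)
--         return f'List<{java_element_type}>'
--
--     # enum 타입 (E로 시작)은 그대로 유지
--     if csharp_type.startswith('E'):
--         return csharp_type
--
--     # 기본 타입 매핑
--     mapped_type = type_mapping.get(csharp_type, csharp_type)
--
--     # 커스텀 타입 (DTO 클래스)에는 Dto 접미사 추가
--     # 기본 타입(Integer, String 등)이 아닌 경우
--     if mapped_type == csharp_type and csharp_type not in type_mapping:
--         # Request/Response는 Dto 불필요
--         if csharp_type.endswith('Request') or csharp_type.endswith('Response'):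
--             return csharp_type
--         return f"{csharp_type}Dto"
--
--     return mapped_type
-- ===== SOURCE B (Python) =====
-- def map_csharp_type_to_java(csharp_type):
--     """C# type -> Java type: iterative peeling of '?'/'[]' suffixes instead of recursion."""
--     type_mapping = {
--         'int': 'Integer',
--         'long': 'Long',
--         'float': 'Float',
--         'double': 'Double',
--         'bool': 'Boolean',
--         'string': 'String',
--         'short': 'Short',
--         'byte': 'Byte',
--     }
--     s = csharp_type
--     wraps = 0
--     while True:
--         if s.endswith('?'):
--             s = s[:-1]
--         if s.endswith('[]'):
--             s = s[:-2]
--             wraps += 1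
--         else:
--             break
--     if s.startswith('E'):
--         core = s
--     elif s in type_mapping:
--         core = type_mapping[s]
--     elif s.endswith('Request') or s.endswith('Response'):
--         core = s
--     else:
--         core = s + 'Dto'
--     for _ in range(wraps):
--         core = f'List<{core}>'
--     return core
-- ===== Notes on version B (the rewrite author's own statement) =====
-- stated objective: alternative
-- what changed: Replaces A's recursion (one '?' strip then one '[]' strip per recursive call) by an explicit loop that peels the same suffixes while counting array levels, a separate base-mapping if/elif chain, and a final loop adding one generic-list wrapper per counted level.
import Mathlib
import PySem

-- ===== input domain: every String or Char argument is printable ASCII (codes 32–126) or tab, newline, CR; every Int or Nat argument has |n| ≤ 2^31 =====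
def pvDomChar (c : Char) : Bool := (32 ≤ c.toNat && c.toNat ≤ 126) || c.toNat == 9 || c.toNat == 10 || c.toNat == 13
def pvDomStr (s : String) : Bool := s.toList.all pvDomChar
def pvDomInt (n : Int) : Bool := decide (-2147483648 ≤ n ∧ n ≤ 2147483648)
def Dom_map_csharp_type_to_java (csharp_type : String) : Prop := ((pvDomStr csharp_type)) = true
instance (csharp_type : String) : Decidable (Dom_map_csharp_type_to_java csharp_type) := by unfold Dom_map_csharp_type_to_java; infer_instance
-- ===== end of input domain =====

-- B replaces A's recursion by an explicit suffix-peeling loop with a wrap counter (same cost; objective: alternative decomposition).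

-- ===== PORT A =====
-- the literal dict 'type_mapping' of A (and of B; both Pythons contain the same literal)
def pvTypeMapping : PySem.Dict (List Char) (List Char) := PySem.Dict.ofList
  [ ("int".toList, "Integer".toList)
  , ("long".toList, "Long".toList)
  , ("float".toList, "Float".toList)
  , ("double".toList, "Double".toList)
  , ("bool".toList, "Boolean".toList)
  , ("string".toList, "String".toList)
  , ("short".toList, "Short".toList)
  , ("byte".toList, "Byte".toList) ]

-- needed by pvMapA's decreasing_by
theorem pvSliceNegTwo (cs : List Char) : PySem.List.slice cs none (some (-2)) = cs.dropLast.dropLast := by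
  simp [PySem.List.slice, PySem.List.clampIdx, List.dropLast_eq_take, List.take_take]
  split_ifs with h <;> (congr 1; omega)

-- A, step for step, on the code-point list (csharp_type[:-1] / [:-2] are PySem slices)
def pvMapA (cs0 : List Char) : List Char :=
  -- csharp_type = csharp_type[:-1] if it ends with '?'
  let cs := if PySem.Chars.endswith cs0 ['?'] then PySem.List.slice cs0 none (some (-1)) else cs0
  if _h : PySem.Chars.endswith cs ['[', ']'] = true then
    -- element_type = csharp_type[:-2]; return f'List<{...}>'
    "List<".toList ++ pvMapA (PySem.List.slice cs none (some (-2))) ++ ">".toList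
  else if PySem.Chars.startswith cs ['E'] then cs
  else
    let mapped := pvTypeMapping.getD cs cs
    if mapped == cs && !(pvTypeMapping.contains cs) then
      if PySem.Chars.endswith cs "Request".toList || PySem.Chars.endswith cs "Response".toList then cs
      else cs ++ "Dto".toList
    else mapped
termination_by cs0.length
decreasing_by
  rw [pvSliceNegTwo]
  show cs.dropLast.dropLast.length < cs0.length
  have h2 : cs.length ≤ cs0.length := by
    show (if PySem.Chars.endswith cs0 ['?'] then PySem.List.slice cs0 none (some (-1)) else cs0).length ≤ cs0.length
    split_ifs with hq
    · rw [PySem.List.slice_to_neg_one]; simp [List.length_dropLast]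
    · exact le_refl _
  have h3 : 2 ≤ cs.length := by
    have := (PySem.Chars.endswith_iff cs ['[', ']']).mp _h
    have := this.length_le
    simpa using this
  simp [List.length_dropLast]
  omega

def map_csharp_type_to_java (csharp_type : String) : String :=
  String.ofList (pvMapA csharp_type.toList)

-- ===== PORT B =====
-- the while-loop of Source B: strip one '?' then one '[]' per iteration, counting array levels
def pvStripB (cs0 : List Char) (w : Nat) : List Char × Nat :=
  let cs := if PySem.Chars.endswith cs0 ['?'] then cs0.dropLast else cs0   -- s[:-1]; exact: slice_to_neg_one
  if h : PySem.Chars.endswith cs ['[', ']'] = true then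
    pvStripB cs.dropLast.dropLast (w + 1)                                   -- s[:-2]; exact: pvSliceNegTwo
  else (cs, w)
termination_by cs0.length
decreasing_by
  show cs.dropLast.dropLast.length < cs0.length
  have h2 : cs.length ≤ cs0.length := by
    show (if PySem.Chars.endswith cs0 ['?'] then cs0.dropLast else cs0).length ≤ cs0.length
    split_ifs with hq
    · simp [List.length_dropLast]
    · exact le_refl _
  have h3 : 2 ≤ cs.length := by
    have := (PySem.Chars.endswith_iff cs ['[', ']']).mp h
    have := this.length_le
    simpa using this
  simp [List.length_dropLast]
  omega

-- the base mapping of Source B (if/elif chain on the stripped core)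
def pvBaseB (cs : List Char) : List Char :=
  if PySem.Chars.startswith cs ['E'] then cs
  else match pvTypeMapping.get? cs with
    | some m => m
    | none =>
      if PySem.Chars.endswith cs "Request".toList || PySem.Chars.endswith cs "Response".toList then cs
      else cs ++ "Dto".toList

-- the final for-loop of Source B: wrap in 'List<…>' once per counted level
def pvWrapB : Nat → List Char → List Char
  | 0, cs => cs
  | n + 1, cs => pvWrapB n ("List<".toList ++ cs ++ ['>'])

def map_csharp_type_to_java_alt (csharp_type : String) : String :=
  let p := pvStripB csharp_type.toList 0
  String.ofList (pvWrapB p.2 (pvBaseB p.1))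

-- ===== PRECONDITION & SPEC =====
def Spec_map_csharp_type_to_java (csharp_type : String) (out : String) : Prop := out = map_csharp_type_to_java_alt csharp_type
instance (csharp_type : String) (out : String) : Decidable (Spec_map_csharp_type_to_java csharp_type out) := by unfold Spec_map_csharp_type_to_java; infer_instance

-- ===== CLAIM (what is proved, stated in full; the proofs are below) =====
def Claim_equal_map_csharp_type_to_java : Prop := ∀ (csharp_type : String), Dom_map_csharp_type_to_java csharp_type → Spec_map_csharp_type_to_java csharp_type (map_csharp_type_to_java csharp_type)

-- ===== LEMMAS AND PROOFS =====

-- A's non-array tail (E-prefix / dict lookup / Request-Response / Dto) equals B's base mapping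
theorem pvTail_eq (cs : List Char) :
    (if PySem.Chars.startswith cs ['E'] then cs
     else if pvTypeMapping.getD cs cs == cs && !(pvTypeMapping.contains cs) then
       if PySem.Chars.endswith cs "Request".toList || PySem.Chars.endswith cs "Response".toList then cs
       else cs ++ "Dto".toList
     else pvTypeMapping.getD cs cs) = pvBaseB cs := by
  unfold pvBaseB
  cases hg : pvTypeMapping.get? cs with
  | none =>
    have hc : pvTypeMapping.contains cs = false := by
      rw [PySem.Dict.contains_eq_isSome_get?, hg]; rfl
    have hd : pvTypeMapping.getD cs cs = cs := by
      rw [PySem.Dict.getD_eq_get?_getD, hg]; rfl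
    simp [hc, hd]
  | some m =>
    have hc : pvTypeMapping.contains cs = true := by
      rw [PySem.Dict.contains_eq_isSome_get?, hg]; rfl
    have hd : pvTypeMapping.getD cs cs = m := by
      rw [PySem.Dict.getD_eq_get?_getD, hg]; rfl
    simp [hc, hd]

-- main invariant: A's recursion equals B's loop followed by the wrap loop, for any pending wrap count
theorem pvMain : ∀ n (cs : List Char), cs.length ≤ n → ∀ w,
    pvWrapB w (pvMapA cs) = pvWrapB (pvStripB cs w).2 (pvBaseB (pvStripB cs w).1) := by
  intro n
  induction n with
  | zero =>
    intro cs hn w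
    have hcs : cs = [] := List.eq_nil_of_length_eq_zero (Nat.le_zero.mp hn)
    subst hcs
    have h1 : pvStripB [] w = ([], w) := by unfold pvStripB; rfl
    have h2 : pvMapA [] = "Dto".toList := by unfold pvMapA; rfl
    rw [h1, h2]
    rfl
  | succ n ih =>
    intro cs hn w
    unfold pvStripB pvMapA
    set cs1 := if PySem.Chars.endswith cs ['?'] then cs.dropLast else cs with hcs1
    have hslice : (if PySem.Chars.endswith cs ['?'] then PySem.List.slice cs none (some (-1)) else cs) = cs1 := by
      rw [PySem.List.slice_to_neg_one, hcs1]
    rw [hslice]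
    have h1 : cs1.length ≤ cs.length := by
      rw [hcs1]; split_ifs <;> simp [List.length_dropLast]
    by_cases ha : PySem.Chars.endswith cs1 ['[', ']'] = true
    · simp only [ha, dite_true]
      rw [pvSliceNegTwo]
      have h3 : 2 ≤ cs1.length := by
        have := ((PySem.Chars.endswith_iff cs1 ['[', ']']).mp ha).length_le
        simpa using this
      have hlen : cs1.dropLast.dropLast.length ≤ n := by
        simp only [List.length_dropLast]; omega
      rw [← ih cs1.dropLast.dropLast hlen (w + 1)]
      rfl
    · rw [Bool.not_eq_true] at ha
      simp only [ha, Bool.false_eq_true, dite_false]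
      exact congrArg (pvWrapB w) (pvTail_eq cs1)

-- ===== VERDICT (by name: the statement is the Claim_ definition above) =====
theorem map_csharp_type_to_java_spec : Claim_equal_map_csharp_type_to_java := by
  intro s _
  unfold Spec_map_csharp_type_to_java map_csharp_type_to_java map_csharp_type_to_java_alt
  have := pvMain s.toList.length s.toList (le_refl _) 0
  simp only [pvWrapB] at this
  rw [this]
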